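-- pv_equiv track=rewrite | github.com/georgiashay/planet_x_server | game_generation/planetx_game/rules.py | _max_between
-- ===== SOURCE A (Python) =====
-- def _max_between(space_object, board):
--     max_run = 0
--     current_run = 0
--     for obj in board:
--         if obj == space_object:
--             if current_run > max_run:
--                 max_run = current_run
--             current_run = 0
--         else:
--             current_run += 1
--
--     for obj in board:
--         if obj == space_object:
--             if current_run > max_run:
--                 max_run = current_run
--             break
--         else:
--             current_run += 1
--
--     return max_run
-- ===== SOURCE B (Python) =====
-- def _max_between(space_object, board):
--     positions = [i for i, obj in enumerate(board) if obj == space_object]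
--     if not positions:
--         return 0
--     n = len(board)
--     gaps = [b - a - 1 for a, b in zip(positions, positions[1:])]
--     gaps.append(positions[0] + n - positions[-1] - 1)
--     return max(gaps)
-- ===== Notes on version B (the rewrite author's own statement) =====
-- stated objective: simpler
-- what changed: Replaced A's two stateful run-counting scans (with a break-based wraparound pass) by collecting the occurrence positions once and taking the max of consecutive-position gaps plus the circular wrap gap.
import Mathlib
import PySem

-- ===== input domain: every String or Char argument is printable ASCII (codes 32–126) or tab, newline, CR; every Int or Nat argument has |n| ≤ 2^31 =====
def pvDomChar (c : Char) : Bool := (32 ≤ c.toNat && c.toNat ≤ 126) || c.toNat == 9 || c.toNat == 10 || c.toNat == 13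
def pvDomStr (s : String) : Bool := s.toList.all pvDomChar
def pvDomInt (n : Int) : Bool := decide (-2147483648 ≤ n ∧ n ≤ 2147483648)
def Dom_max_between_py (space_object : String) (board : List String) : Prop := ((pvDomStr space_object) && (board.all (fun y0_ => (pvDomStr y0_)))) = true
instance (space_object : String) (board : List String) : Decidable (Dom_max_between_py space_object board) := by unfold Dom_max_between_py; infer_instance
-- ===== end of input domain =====

-- B replaces A's two stateful run-counting scans (the second with a break) by collecting the
-- occurrence positions once and maximising consecutive gaps plus the circular wrap gap (simpler).

-- ===== PORT A =====
-- first loop of A: state (max_run, current_run)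
def pvLoop1 (s : String) (m c : Int) : List String → Int × Int
  | [] => (m, c)
  | x :: xs =>
      if x == s then pvLoop1 s (if c > m then c else m) 0 xs
      else pvLoop1 s m (c + 1) xs

-- second loop of A: breaks at the first occurrence
def pvLoop2 (s : String) (m c : Int) : List String → Int
  | [] => m
  | x :: xs =>
      if x == s then (if c > m then c else m)
      else pvLoop2 s m (c + 1) xs

def max_between_py (space_object : String) (board : List String) : Int :=
  let st := pvLoop1 space_object 0 0 board
  pvLoop2 space_object st.1 st.2 board

-- ===== PORT B =====
def max_between_py_alt (space_object : String) (board : List String) : Int :=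
  let positions : List Int :=
    ((PySem.List.enumerate board).filter (fun p => p.2 == space_object)).map (fun p => p.1)
  match positions with
  | [] => 0                                  -- if not positions: return 0
  | p :: ps =>
      let n : Int := PySem.List.len board
      let gaps : List Int :=
        ((p :: ps).zip (PySem.List.slice (p :: ps) (some 1) none)).map (fun q => q.2 - q.1 - 1)
          ++ [p + n - ((p :: ps).getLast (List.cons_ne_nil p ps)) - 1]
      -- max(gaps): gaps ends with the appended wrap gap, so it is nonempty and getD's default is never used
      (PySem.List.max? gaps (fun x => x)).getD 0

-- ===== PRECONDITION & SPEC =====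
def Spec_max_between_py (space_object : String) (board : List String) (out : Int) : Prop := out = max_between_py_alt space_object board
instance (space_object : String) (board : List String) (out : Int) : Decidable (Spec_max_between_py space_object board out) := by unfold Spec_max_between_py; infer_instance

-- ===== CLAIM (what is proved, stated in full; the proofs are below) =====
def Claim_equal_max_between_py : Prop := ∀ (space_object : String) (board : List String), Dom_max_between_py space_object board → Spec_max_between_py space_object board (max_between_py space_object board)

-- ===== LEMMAS AND PROOFS =====

-- positions of s in a list, starting at index i (proof-side mirror of B's comprehension)
def pvPos (s : String) (i : Int) : List String → List Int
  | [] => []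
  | x :: xs => if x == s then i :: pvPos s (i + 1) xs else pvPos s (i + 1) xs

-- running max of gaps between consecutive positions; returns (max so far, last position)
def pvGapFold (m last : Int) : List Int → Int × Int
  | [] => (m, last)
  | q :: qs => pvGapFold (max m (q - last - 1)) q qs

theorem pvPos_bridge (s : String) : ∀ (xs : List String) (i : Int),
    ((PySem.List.enumerate xs i).filter (fun p => p.2 == s)).map (fun p => p.1) = pvPos s i xs := by
  intro xs
  induction xs with
  | nil => intro i; simp [PySem.List.enumerate_nil, pvPos]
  | cons x xs ih =>
      intro i
      rw [PySem.List.enumerate_cons]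
      by_cases h : x == s <;> simp [pvPos, h, ih]

theorem pvPos_lt (s : String) : ∀ (xs : List String) (i : Int),
    ∀ q ∈ pvPos s i xs, q < i + xs.length := by
  intro xs
  induction xs with
  | nil => intro i q hq; simp [pvPos] at hq
  | cons x xs ih =>
      intro i q hq
      simp only [pvPos] at hq
      split at hq
      · rcases List.mem_cons.mp hq with rfl | hq
        · simp only [List.length_cons]; omega
        · have := ih (i + 1) q hq; simp at this ⊢; omega
      · have := ih (i + 1) q hq; simp at this ⊢; omega

theorem pvIfMax (m c : Int) : (if c > m then c else m) = max m c := by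
  split <;> omega

-- invariant of A's first loop: with current_run = i - last - 1, it computes pvGapFold over the positions
theorem pvLoop1_gap (s : String) : ∀ (xs : List String) (m last i : Int),
    pvLoop1 s m (i - last - 1) xs =
      ((pvGapFold m last (pvPos s i xs)).1,
        i + xs.length - (pvGapFold m last (pvPos s i xs)).2 - 1) := by
  intro xs
  induction xs with
  | nil => intro m last i; simp [pvLoop1, pvPos, pvGapFold]
  | cons x xs ih =>
      intro m last i
      by_cases h : x == s
      · simp only [pvLoop1, pvPos, h, if_pos, pvGapFold, pvIfMax]
        have h0 : (0 : Int) = (i + 1) - i - 1 := by omega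
        rw [h0, ih (max m (i - last - 1)) i (i + 1)]
        simp only [Prod.mk.injEq, List.length_cons]
        exact ⟨trivial, by push_cast; omega⟩
      · simp only [pvLoop1, pvPos, h, if_neg, Bool.false_eq_true, not_false_iff]
        have h1 : i - last - 1 + 1 = (i + 1) - last - 1 := by omega
        rw [h1, ih m last (i + 1)]
        simp only [Prod.mk.injEq, List.length_cons]
        exact ⟨trivial, by push_cast; omega⟩

theorem pvLoop1_split (s : String) : ∀ (pre : List String) (y : String) (rest : List String)
    (m c : Int), (∀ x ∈ pre, (x == s) = false) → (y == s) = true →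
    pvLoop1 s m c (pre ++ y :: rest) = pvLoop1 s (max m (c + pre.length)) 0 rest := by
  intro pre
  induction pre with
  | nil =>
      intro y rest m c _ hy
      simp [pvLoop1, hy, pvIfMax]
  | cons p pre ih =>
      intro y rest m c hpre hy
      have hp : (p == s) = false := hpre p (List.mem_cons_self ..)
      simp only [List.cons_append, pvLoop1, hp, Bool.false_eq_true, if_neg, not_false_iff]
      rw [ih y rest m (c + 1) (fun x hx => hpre x (List.mem_cons_of_mem _ hx)) hy]
      congr 2
      simp; omega

theorem pvLoop2_split (s : String) : ∀ (pre : List String) (y : String) (rest : List String)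
    (m c : Int), (∀ x ∈ pre, (x == s) = false) → (y == s) = true →
    pvLoop2 s m c (pre ++ y :: rest) = max m (c + pre.length) := by
  intro pre
  induction pre with
  | nil =>
      intro y rest m c _ hy
      simp [pvLoop2, hy, pvIfMax]
  | cons p pre ih =>
      intro y rest m c hpre hy
      have hp : (p == s) = false := hpre p (List.mem_cons_self ..)
      simp only [List.cons_append, pvLoop2, hp, Bool.false_eq_true, if_neg, not_false_iff]
      rw [ih y rest m (c + 1) (fun x hx => hpre x (List.mem_cons_of_mem _ hx)) hy]
      congr 1
      simp; omega

theorem pvLoop1_not_mem (s : String) : ∀ (xs : List String) (m c : Int),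
    (∀ x ∈ xs, (x == s) = false) → pvLoop1 s m c xs = (m, c + xs.length) := by
  intro xs
  induction xs with
  | nil => intro m c _; simp [pvLoop1]
  | cons x xs ih =>
      intro m c hxs
      have hx : (x == s) = false := hxs x (List.mem_cons_self ..)
      simp only [pvLoop1, hx, Bool.false_eq_true, if_neg, not_false_iff]
      rw [ih m (c + 1) (fun y hy => hxs y (List.mem_cons_of_mem _ hy))]
      simp; omega

theorem pvLoop2_not_mem (s : String) : ∀ (xs : List String) (m c : Int),
    (∀ x ∈ xs, (x == s) = false) → pvLoop2 s m c xs = m := by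
  intro xs
  induction xs with
  | nil => intro m c _; rfl
  | cons x xs ih =>
      intro m c hxs
      have hx : (x == s) = false := hxs x (List.mem_cons_self ..)
      simp only [pvLoop2, hx, Bool.false_eq_true, if_neg, not_false_iff]
      exact ih m (c + 1) (fun y hy => hxs y (List.mem_cons_of_mem _ hy))

theorem pvPos_not_mem (s : String) : ∀ (xs : List String) (i : Int),
    (∀ x ∈ xs, (x == s) = false) → pvPos s i xs = [] := by
  intro xs
  induction xs with
  | nil => intro i _; rfl
  | cons x xs ih =>
      intro i hxs
      have hx : (x == s) = false := hxs x (List.mem_cons_self ..)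
      simp only [pvPos, hx, Bool.false_eq_true, if_neg, not_false_iff]
      exact ih (i + 1) (fun y hy => hxs y (List.mem_cons_of_mem _ hy))

theorem pvPos_split (s : String) : ∀ (pre : List String) (y : String) (rest : List String)
    (i : Int), (∀ x ∈ pre, (x == s) = false) → (y == s) = true →
    pvPos s i (pre ++ y :: rest) = (i + pre.length) :: pvPos s (i + pre.length + 1) rest := by
  intro pre
  induction pre with
  | nil =>
      intro y rest i _ hy
      simp [pvPos, hy]
  | cons p pre ih =>
      intro y rest i hpre hy
      have hp : (p == s) = false := hpre p (List.mem_cons_self ..)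
      simp only [List.cons_append, pvPos, hp, Bool.false_eq_true, if_neg, not_false_iff]
      rw [ih y rest (i + 1) (fun x hx => hpre x (List.mem_cons_of_mem _ hx)) hy]
      simp only [List.length_cons, Nat.cast_add, Nat.cast_one]
      rw [show (i + 1) + (pre.length : Int) = i + ((pre.length : Int) + 1) from by ring]

theorem pvGapFold_last : ∀ (ps : List Int) (m last : Int),
    (pvGapFold m last ps).2 = (last :: ps).getLast (List.cons_ne_nil last ps) := by
  intro ps
  induction ps with
  | nil => intro m last; rfl
  | cons q qs ih =>
      intro m last
      rw [pvGapFold, ih]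
      simp [List.getLast_cons]

theorem pvGapFold_fst : ∀ (ps : List Int) (m last : Int),
    (pvGapFold m last ps).1 =
      List.foldl max m (((last :: ps).zip ps).map (fun q => q.2 - q.1 - 1)) := by
  intro ps
  induction ps with
  | nil => intro m last; rfl
  | cons q qs ih =>
      intro m last
      rw [pvGapFold, ih]
      simp [List.zip_cons_cons, List.foldl_cons]

theorem pvFoldlMaxShift : ∀ (l : List Int) (a b : Int),
    List.foldl max (max a b) l = max a (List.foldl max b l) := by
  intro l
  induction l with
  | nil => intro a b; rfl
  | cons x xs ih =>
      intro a b
      simp only [List.foldl_cons, max_assoc, ih]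

-- the required case split: either s does not occur, or board = pre ++ s-cell :: rest with s ∉ pre
theorem pvDecomp (s : String) : ∀ (board : List String),
    (∀ x ∈ board, (x == s) = false) ∨
      ∃ pre y rest, board = pre ++ y :: rest ∧ (∀ x ∈ pre, (x == s) = false) ∧ (y == s) = true := by
  intro board
  induction board with
  | nil => exact Or.inl (by simp)
  | cons x xs ih =>
      by_cases hx : x == s
      · exact Or.inr ⟨[], x, xs, by simp, by simp, hx⟩
      · rcases ih with h | ⟨pre, y, rest, hb, hpre, hy⟩
        · refine Or.inl ?_
          intro z hz
          rcases List.mem_cons.mp hz with rfl | hz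
          · simpa using hx
          · exact h z hz
        · refine Or.inr ⟨x :: pre, y, rest, by simp [hb], ?_, hy⟩
          intro z hz
          rcases List.mem_cons.mp hz with rfl | hz
          · simpa using hx
          · exact hpre z hz

-- ===== VERDICT (by name: the statement is the Claim_ definition above) =====
theorem max_between_py_spec : Claim_equal_max_between_py := by
  intro s board _
  unfold Spec_max_between_py max_between_py max_between_py_alt
  rw [pvPos_bridge s board 0]
  rcases pvDecomp s board with hno | ⟨pre, y, rest, hb, hpre, hy⟩
  · -- s does not occur: both return 0
    rw [pvPos_not_mem s board 0 hno, pvLoop1_not_mem s board 0 0 hno]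
    simp only
    rw [pvLoop2_not_mem s board 0 _ hno]
  · subst hb
    set p₀ : Int := (pre.length : Int) with hp₀
    set P : List Int := pvPos s (p₀ + 1) rest with hP
    -- positions of the whole board
    have hpos : pvPos s 0 (pre ++ y :: rest) = p₀ :: P := by
      rw [pvPos_split s pre y rest 0 hpre hy]
      have : (0 : Int) + pre.length = p₀ := by omega
      rw [this]
    -- A's first loop
    have h1 : pvLoop1 s 0 0 (pre ++ y :: rest) = pvLoop1 s p₀ 0 rest := by
      rw [pvLoop1_split s pre y rest 0 0 hpre hy]
      congr 1
      omega
    set G := pvGapFold p₀ p₀ P with hG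
    have h2 : pvLoop1 s p₀ 0 rest = (G.1, (p₀ + 1) + rest.length - G.2 - 1) := by
      have h0 : (0 : Int) = (p₀ + 1) - p₀ - 1 := by omega
      rw [h0, pvLoop1_gap s rest p₀ p₀ (p₀ + 1)]
    set n : Int := ((pre ++ y :: rest).length : Int) with hn
    have hnval : n = p₀ + 1 + rest.length := by
      simp only [hn, hp₀, List.length_append, List.length_cons]
      push_cast
      ring
    -- A's value
    have hA : pvLoop2 s (pvLoop1 s 0 0 (pre ++ y :: rest)).1 (pvLoop1 s 0 0 (pre ++ y :: rest)).2
        (pre ++ y :: rest) = max G.1 (n - G.2 - 1 + p₀) := by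
      rw [h1, h2]
      rw [pvLoop2_split s pre y rest G.1 ((p₀ + 1) + rest.length - G.2 - 1) hpre hy]
      congr 1
      omega
    rw [hpos]
    simp only
    rw [PySem.List.slice_from_one]
    simp only [List.tail_cons]
    -- B's wrap gap equals A's second argument
    have hlast : (p₀ :: P).getLast (List.cons_ne_nil p₀ P) = G.2 := (pvGapFold_last P p₀ p₀).symm
    have hwrap : p₀ + PySem.List.len (pre ++ y :: rest) - (p₀ :: P).getLast (List.cons_ne_nil p₀ P) - 1
        = n - G.2 - 1 + p₀ := by
      rw [hlast, PySem.List.len_eq, ← hn]; omega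
    -- the last position is < n, so the wrap gap dominates p₀
    have hlt : G.2 < n := by
      have hmem := List.getLast_mem (List.cons_ne_nil p₀ P)
      rw [hlast] at hmem
      rcases List.mem_cons.mp hmem with he | hmem
      · rw [he]; omega
      · have := pvPos_lt s rest (p₀ + 1) _ hmem
        omega
    have hp0w : p₀ ≤ n - G.2 - 1 + p₀ := by omega
    -- finish by cases on whether there are interior gaps
    rw [hA]
    rw [pvGapFold_fst P p₀ p₀] at *
    cases hI : ((p₀ :: P).zip P).map (fun q => q.2 - q.1 - 1) with
    | nil =>
        simp only [List.nil_append, List.foldl_nil]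
        rw [PySem.List.max?_id_cons]
        simp only [List.foldl_nil, Option.getD_some]
        rw [hwrap]
        omega
    | cons g gs =>
        simp only [List.cons_append]
        rw [PySem.List.max?_id_cons]
        simp only [Option.getD_some, List.foldl_cons, List.foldl_append, List.foldl_nil]
        rw [hwrap, pvFoldlMaxShift]
        omega
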